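-- pv_equiv track=rewrite | github.com/moe10k/Cipher-Decryptor-Tool | vigenere-progressivekey-decryptor/progressive_key_vigenere.py | generate_progressive_keystream
-- ===== SOURCE A (Python) =====
-- def shift_key_once(key):
--     shifted = ''
--     for char in key:
--         shifted += chr((ord(char.upper()) - ord('A') + 1) % 26 + ord('A'))
--     return shifted
--
-- def generate_progressive_keystream(base_key, length):
--     keystream = ''
--     current_key = base_key.upper()
--     while len(keystream) < length:
--         for char in current_key:
--             if len(keystream) >= length:
--                 break
--             keystream += char
--         current_key = shift_key_once(current_key)
--     return keystream
-- ===== SOURCE B (Python) =====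
-- def generate_progressive_keystream(base_key, length):
--     base = base_key.upper()
--     n = len(base)
--     out = []
--     for i in range(length):
--         c, j = divmod(i, n)
--         if c == 0:
--             out.append(base[j])
--         else:
--             out.append(chr((ord(base[j]) - ord('A') + c) % 26 + ord('A')))
--     return ''.join(out)
-- ===== Notes on version B (the rewrite author's own statement) =====
-- stated objective: faster
-- what changed: B computes each keystream character directly by closed form (cycle index c = i//n shifts the base character by c mod 26) in a single pass over range(length), instead of repeatedly re-shifting and re-emitting the whole key cycle by cycle with string concatenation.
import Mathlib
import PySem

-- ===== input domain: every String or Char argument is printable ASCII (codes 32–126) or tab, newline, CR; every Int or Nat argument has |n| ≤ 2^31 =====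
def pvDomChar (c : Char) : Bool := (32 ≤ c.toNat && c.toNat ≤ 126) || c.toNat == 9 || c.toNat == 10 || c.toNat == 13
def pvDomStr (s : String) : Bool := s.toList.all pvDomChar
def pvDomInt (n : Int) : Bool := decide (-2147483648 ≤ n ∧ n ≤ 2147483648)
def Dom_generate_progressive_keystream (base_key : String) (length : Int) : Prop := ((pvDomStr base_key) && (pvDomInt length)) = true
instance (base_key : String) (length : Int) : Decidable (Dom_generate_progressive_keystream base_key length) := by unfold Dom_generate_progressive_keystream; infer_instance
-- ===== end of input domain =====

-- B computes each keystream character by a closed form (cycle c = i//n shifts char by c mod 26)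
-- in one pass instead of re-shifting and re-emitting the whole key cycle by cycle; measured faster by a constant factor.


-- ===== PORT A =====
-- chr((ord(char.upper()) - ord('A') + 1) % 26 + ord('A'))
def pvShiftChar (c : Char) : Char :=
  Char.ofNat ((((PySem.Chars.upperChar c).toNat : Int) - 65 + 1) % 26 + 65).toNat

-- shift_key_once: builds the shifted string by appending character by character
def shift_key_once (key : List Char) : List Char :=
  key.foldl (fun shifted c => shifted ++ [pvShiftChar c]) []

-- the inner 'for char in current_key' loop with its break
def pvInnerA (len : Int) (ks : List Char) : List Char → List Char
  | [] => ks
  | c :: rest => if (ks.length : Int) ≥ len then ks else pvInnerA len (ks ++ [c]) rest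

-- the outer while loop; the 'else' branch is a totality guard, reachable only when
-- the key is empty (there Python loops forever, excluded by Pre_)
def pvLoopA (len : Int) (ks key : List Char) : List Char :=
  if _h : (ks.length : Int) < len then
    if _h2 : ks.length < (pvInnerA len ks key).length then
      pvLoopA len (pvInnerA len ks key) (shift_key_once key)
    else pvInnerA len ks key
  else ks
termination_by (len - ks.length).toNat
decreasing_by omega

def generate_progressive_keystream (base_key : String) (length : Int) : String :=
  String.mk (pvLoopA length [] (PySem.Str.upper base_key).toList)

-- ===== PORT B =====
-- chr(v % 26 + ord('A'))
def pvLetter (v : Int) : Char := Char.ofNat (v % 26 + 65).toNat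

def generate_progressive_keystream_alt (base_key : String) (length : Int) : String :=
  let base := (PySem.Str.upper base_key).toList
  let n : Int := base.length
  String.mk ((PySem.List.pyRange 0 length 1).map (fun i =>
    let c := PySem.Int.floordiv i n
    let j := PySem.Int.mod i n
    let ch := (PySem.List.pyGet? base j).getD 'A'   -- base[j]; in range whenever Pre_ holds
    if c = 0 then ch else pvLetter ((ch.toNat : Int) - 65 + c)))

-- ===== PRECONDITION & SPEC =====
-- Pre_ excludes only base_key = "" with length > 0: there Python A loops forever (never returns),
-- and B raises ZeroDivisionError.
def Pre_generate_progressive_keystream (base_key : String) (length : Int) : Prop :=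
  base_key ≠ "" ∨ length ≤ 0
instance (base_key : String) (length : Int) : Decidable (Pre_generate_progressive_keystream base_key length) := by unfold Pre_generate_progressive_keystream; infer_instance

def pvWitness_generate_progressive_keystream : String × Int := ("Key!", 10)

def Spec_generate_progressive_keystream (base_key : String) (length : Int) (out : String) : Prop := out = generate_progressive_keystream_alt base_key length
instance (base_key : String) (length : Int) (out : String) : Decidable (Spec_generate_progressive_keystream base_key length out) := by unfold Spec_generate_progressive_keystream; infer_instance

-- ===== CLAIM (what is proved, stated in full; the proofs are below) =====
def Claim_equal_generate_progressive_keystream : Prop := ∀ (base_key : String) (length : Int), Dom_generate_progressive_keystream base_key length → Pre_generate_progressive_keystream base_key length → Spec_generate_progressive_keystream base_key length (generate_progressive_keystream base_key length)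

-- ===== LEMMAS AND PROOFS =====

lemma foldl_append_map (f : Char → Char) : ∀ (key acc : List Char),
    key.foldl (fun shifted c => shifted ++ [f c]) acc = acc ++ key.map f
  | [], acc => by simp
  | c :: rest, acc => by
      rw [List.foldl_cons, foldl_append_map f rest (acc ++ [f c])]
      simp

lemma shift_eq_map (key : List Char) : shift_key_once key = key.map pvShiftChar := by
  unfold shift_key_once
  rw [foldl_append_map]
  simp

lemma upper_ne_nil (s : String) (h : s ≠ "") : (PySem.Str.upper s).toList ≠ [] := by
  rw [PySem.Str.toList_upper]
  simp only [PySem.Chars.upper, ne_eq, List.map_eq_nil_iff]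
  intro hc
  exact h (String.toList_eq_nil_iff.mp hc)

-- common target stream: the concatenation key ++ shift key ++ shift² key ++ …, first m chars
def pvStream (key : List Char) (m : Nat) : List Char :=
  if h : key = [] ∨ m = 0 then [] else key.take m ++ pvStream (key.map pvShiftChar) (m - key.length)
termination_by m
decreasing_by
  push_neg at h
  have h1 : 0 < key.length := List.length_pos_of_ne_nil h.1
  omega

lemma inner_eq (len : Int) : ∀ (key ks : List Char),
    pvInnerA len ks key = ks ++ key.take (len - ks.length).toNat := by
  intro key
  induction key with
  | nil => intro ks; simp [pvInnerA]
  | cons c rest ih =>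
    intro ks
    by_cases h : (ks.length : Int) ≥ len
    · have : (len - ks.length).toNat = 0 := by omega
      simp [pvInnerA, h, this]
    · have hpos : 0 < (len - ks.length).toNat := by omega
      obtain ⟨k, hk⟩ : ∃ k, (len - ks.length).toNat = k + 1 := ⟨_, (Nat.succ_pred_eq_of_pos hpos).symm⟩
      have hk' : (len - (((ks ++ [c]).length : Nat) : Int)).toNat = k := by simp; omega
      simp only [pvInnerA, if_neg h, ih, hk, hk', List.take_succ_cons]
      simp

lemma innerA_len (len : Int) (ks key : List Char) :
    (pvInnerA len ks key).length = ks.length + min (len - ks.length).toNat key.length := by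
  rw [inner_eq]
  simp [List.length_append, List.length_take]

lemma loop_eq : ∀ (len : Int) (ks key : List Char), key ≠ [] →
    pvLoopA len ks key = ks ++ pvStream key (len - ks.length).toNat := by
  intro len
  suffices h : ∀ (n : Nat) (ks key : List Char), (len - ks.length).toNat = n → key ≠ [] →
      pvLoopA len ks key = ks ++ pvStream key (len - ks.length).toNat by
    intro ks key hk
    exact h _ ks key rfl hk
  intro n
  induction n using Nat.strong_induction_on with
  | _ n ih =>
    intro ks key hmeas hk
    have h1 : 0 < key.length := List.length_pos_of_ne_nil hk
    rw [pvLoopA]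
    by_cases h : (ks.length : Int) < len
    · rw [dif_pos h]
      have hlen' := innerA_len len ks key
      have hm : 0 < (len - ks.length).toNat := by omega
      have h2 : ks.length < (pvInnerA len ks key).length := by omega
      rw [dif_pos h2]
      have hk2 : shift_key_once key ≠ [] := by
        rw [shift_eq_map]
        simpa using hk
      rw [ih ((len - ((pvInnerA len ks key).length : Int)).toNat) (by omega) _ _ rfl hk2]
      rw [inner_eq]
      conv_rhs => rw [pvStream]
      rw [dif_neg (show ¬ (key = [] ∨ (len - (ks.length : Int)).toNat = 0) by
        push_neg
        exact ⟨hk, by omega⟩)]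
      have hlt : (len - (((ks ++ key.take (len - (ks.length : Int)).toNat).length : Nat) : Int)).toNat
          = (len - (ks.length : Int)).toNat - key.length := by
        simp only [List.length_append, List.length_take]
        omega
      rw [hlt, shift_eq_map, List.append_assoc]
    · rw [dif_neg h]
      have h0 : (len - (ks.length : Int)).toNat = 0 := by omega
      rw [h0, pvStream]
      simp

-- closed-form character i of the stream over key
def pvG (key : List Char) (i : Nat) : Char :=
  if i / key.length = 0 then key.getD i 'A'
  else pvLetter (((key.getD (i % key.length) 'A').toNat : Int) - 65 + ((i / key.length : Nat) : Int))

lemma toNat_letter (v : Int) : ((pvLetter v).toNat : Int) = v % 26 + 65 := by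
  have h1 : 0 ≤ v % 26 := Int.emod_nonneg v (by norm_num)
  have h2 : v % 26 < 26 := Int.emod_lt_of_pos v (by norm_num)
  unfold pvLetter
  rw [Char.toNat_ofNat, if_pos (Or.inl (by omega) : Nat.isValidChar _)]
  omega

lemma letter_mod (v : Int) (c : Int) : pvLetter (v % 26 + c) = pvLetter (v + c) := by
  unfold pvLetter
  congr 1
  omega

lemma islower_iff (ch : Char) : PySem.Chars.islower ch = true ↔ 97 ≤ ch.toNat ∧ ch.toNat ≤ 122 := by
  unfold PySem.Chars.islower
  simp only [Bool.and_eq_true, decide_eq_true_eq]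
  rw [Char.le_def, Char.le_def, UInt32.le_iff_toNat_le, UInt32.le_iff_toNat_le]
  exact Iff.rfl

lemma islower_letter (v : Int) : PySem.Chars.islower (pvLetter v) = false := by
  have h := toNat_letter v
  have h1 : 0 ≤ v % 26 := Int.emod_nonneg v (by norm_num)
  have h2 : v % 26 < 26 := Int.emod_lt_of_pos v (by norm_num)
  rw [Bool.eq_false_iff]
  intro hc
  rw [islower_iff] at hc
  omega

lemma shiftChar_of_not_lower (c : Char) (h : PySem.Chars.islower c = false) :
    pvShiftChar c = pvLetter ((c.toNat : Int) - 65 + 1) := by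
  unfold pvShiftChar pvLetter PySem.Chars.upperChar
  rw [h]
  simp

lemma islower_shiftChar (c : Char) : PySem.Chars.islower (pvShiftChar c) = false := by
  have h : pvShiftChar c = pvLetter (((PySem.Chars.upperChar c).toNat : Int) - 65 + 1) := rfl
  rw [h]; exact islower_letter _

lemma islower_upperChar (c : Char) : PySem.Chars.islower (PySem.Chars.upperChar c) = false := by
  unfold PySem.Chars.upperChar
  by_cases h : PySem.Chars.islower c = true
  · rw [if_pos h]
    rw [islower_iff] at h
    have hv : (Char.ofNat (c.toNat - 32)).toNat = c.toNat - 32 := by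
      rw [Char.toNat_ofNat, if_pos (Or.inl (by omega) : Nat.isValidChar _)]
    rw [Bool.eq_false_iff]
    intro hc
    rw [islower_iff, hv] at hc
    omega
  · rw [if_neg h]
    exact Bool.not_eq_true _ |>.mp h

lemma getD_map_shift (key : List Char) (j : Nat) (hj : j < key.length) :
    (key.map pvShiftChar).getD j 'A' = pvShiftChar (key.getD j 'A') := by
  rw [List.getD_eq_getElem _ _ (by simpa using hj), List.getD_eq_getElem _ _ hj]
  simp

lemma g_shift (key : List Char) (hk : key ≠ []) (H : ∀ c ∈ key, PySem.Chars.islower c = false)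
    (i : Nat) : pvG key (key.length + i) = pvG (key.map pvShiftChar) i := by
  have hn : 0 < key.length := List.length_pos_of_ne_nil hk
  have hmod : (key.length + i) % key.length = i % key.length := Nat.add_mod_left _ _
  have hdiv : (key.length + i) / key.length = i / key.length + 1 := by
    rw [Nat.add_comm, Nat.add_div_right _ hn]
  have hj : i % key.length < key.length := Nat.mod_lt _ hn
  unfold pvG
  rw [hmod, hdiv]
  simp only [List.length_map]
  by_cases hc : i / key.length = 0
  · have hi : i < key.length := Nat.lt_of_div_eq_zero hn hc
    have hmem' : key.getD i 'A' ∈ key := by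
      rw [List.getD_eq_getElem _ _ hi]; exact List.getElem_mem _
    rw [if_neg (Nat.succ_ne_zero (i / key.length)), if_pos hc, getD_map_shift _ _ hi,
        shiftChar_of_not_lower _ (H _ hmem'), Nat.mod_eq_of_lt hi]
    congr 1
    push_cast [hc]
    ring
  · have hmem : key.getD (i % key.length) 'A' ∈ key := by
      rw [List.getD_eq_getElem _ _ hj]; exact List.getElem_mem _
    rw [if_neg (Nat.succ_ne_zero (i / key.length)), if_neg hc, getD_map_shift _ _ hj,
        shiftChar_of_not_lower _ (H _ hmem), toNat_letter]
    have harg : ((key.getD (i % key.length) 'A').toNat - 65 + 1 : Int) % 26 + 65 - 65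
        + ((i / key.length : Nat) : Int)
        = ((key.getD (i % key.length) 'A').toNat - 65 + 1 : Int) % 26
        + ((i / key.length : Nat) : Int) := by ring
    rw [harg, letter_mod]
    congr 1
    push_cast
    ring

lemma range_map_g_take (key : List Char) (m : Nat) (hm : m ≤ key.length) :
    (List.range m).map (pvG key) = key.take m := by
  apply List.ext_getElem
  · simp [List.length_take]; omega
  · intro i h1 h2
    simp only [List.getElem_map, List.getElem_range, List.getElem_take]
    have hi : i < m := by simpa using h1
    have hik : i < key.length := by omega
    unfold pvG
    rw [if_pos (Nat.div_eq_of_lt hik)]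
    rw [List.getD_eq_getElem _ _ hik]

lemma stream_eq_map_range : ∀ (m : Nat) (key : List Char), key ≠ [] →
    (∀ c ∈ key, PySem.Chars.islower c = false) →
    pvStream key m = (List.range m).map (pvG key) := by
  intro m
  induction m using Nat.strong_induction_on with
  | _ m ih =>
    intro key hk H
    have hn : 0 < key.length := List.length_pos_of_ne_nil hk
    by_cases hm : m = 0
    · rw [pvStream]
      simp [hm]
    · rw [pvStream, dif_neg (by push_neg; exact ⟨hk, hm⟩ :
        ¬ (key = [] ∨ m = 0))]
      have hk2 : key.map pvShiftChar ≠ [] := by simpa using hk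
      have H2 : ∀ c ∈ key.map pvShiftChar, PySem.Chars.islower c = false := by
        intro c hc
        obtain ⟨d, _, rfl⟩ := List.mem_map.mp hc
        exact islower_shiftChar d
      by_cases hle : m ≤ key.length
      · have h0 : m - key.length = 0 := by omega
        rw [h0, pvStream]
        simp [range_map_g_take key m hle]
      · push_neg at hle
        rw [ih (m - key.length) (by omega) _ hk2 H2]
        have hsplit : m = key.length + (m - key.length) := by omega
        conv_rhs => rw [hsplit]
        rw [List.range_add, List.map_append, List.map_map]
        congr 1
        · rw [List.take_of_length_le (by omega)]
          exact ((range_map_g_take key key.length (le_refl _)).trans List.take_length).symm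
        · apply List.map_congr_left
          intro i _
          exact (g_shift key hk H i).symm

lemma upper_not_lower (s : String) :
    ∀ c ∈ (PySem.Str.upper s).toList, PySem.Chars.islower c = false := by
  intro c hc
  rw [PySem.Str.toList_upper] at hc
  obtain ⟨d, _, rfl⟩ := List.mem_map.mp hc
  exact islower_upperChar d

-- B as the same map over List.range
lemma alt_eq_map_range (base_key : String) (length : Int) (hk : base_key ≠ "") :
    generate_progressive_keystream_alt base_key length
      = String.mk ((List.range length.toNat).map (pvG (PySem.Str.upper base_key).toList)) := by
  unfold generate_progressive_keystream_alt
  dsimp only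
  congr 1
  have hnil : (PySem.Str.upper base_key).toList ≠ [] := upper_ne_nil base_key hk
  have hn : 0 < (PySem.Str.upper base_key).toList.length := List.length_pos_of_ne_nil hnil
  rw [PySem.List.pyRange_one, List.map_map]
  have hlen : ((length : Int) - 0).toNat = length.toNat := by norm_num
  rw [hlen]
  apply List.map_congr_left
  intro k _
  set base := (PySem.Str.upper base_key).toList with hbase
  simp only [Function.comp_apply, zero_add]
  rw [PySem.Int.floordiv_natCast, PySem.Int.mod_natCast]
  rw [PySem.List.pyGet?_natCast]
  have hj : k % base.length < base.length := Nat.mod_lt _ hn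
  rw [List.getElem?_eq_getElem (by simpa using hj)]
  unfold pvG
  simp only [Option.getD_some]
  rw [List.getD_eq_getElem _ _ hj]
  by_cases hc : k / base.length = 0
  · have hklt : k < base.length := Nat.lt_of_div_eq_zero hn hc
    have hmk : k % base.length = k := Nat.mod_eq_of_lt hklt
    rw [if_pos (show ((k / base.length : Nat) : Int) = 0 by exact_mod_cast hc), if_pos hc,
        List.getD_eq_getElem _ _ hklt]
    simp only [hmk]
  · rw [if_neg (show ¬ ((k / base.length : Nat) : Int) = 0 by
        intro h; exact hc (by exact_mod_cast h)), if_neg hc]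

-- ===== VERDICT (by name: the statement is the Claim_ definition above) =====
theorem generate_progressive_keystream_spec : Claim_equal_generate_progressive_keystream := by
  intro base_key length _ hpre
  unfold Spec_generate_progressive_keystream
  by_cases hL : length ≤ 0
  · unfold generate_progressive_keystream generate_progressive_keystream_alt
    rw [pvLoopA]
    rw [dif_neg (by simp; omega)]
    rw [PySem.List.pyRange_one_eq_nil (by omega)]
    simp
  · push_neg at hL
    have hk : base_key ≠ "" := by
      rcases hpre with h | h
      · exact h
      · omega
    have hnil := upper_ne_nil base_key hk
    unfold generate_progressive_keystream
    rw [loop_eq length [] _ hnil]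
    simp only [List.length_nil, Nat.cast_zero, Int.sub_zero, List.nil_append]
    rw [stream_eq_map_range _ _ hnil (upper_not_lower base_key)]
    rw [alt_eq_map_range base_key length hk]
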